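-- pv_equiv track=rewrite | github.com/getomnico/omni | services/ai/evaluation/datasets/generate_golden.py | _stratified_pick
-- ===== SOURCE A (Python) =====
-- def _stratified_pick(
--     subset_candidates: dict[str, list[dict]], golden_size: int
-- ) -> list[dict]:
--     """Pick `golden_size` samples spread evenly across MRQA subsets.
--
--     Deterministic: subsets iterated in sorted order; within each subset picks
--     are at evenly-spaced indices (no RNG). Subsets with fewer candidates than
--     their allocation contribute everything they have; the shortfall is
--     redistributed to later subsets so the total hits `golden_size` when
--     possible.
--     """
--     subsets = sorted(subset_candidates)
--     if not subsets:
--         return []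
--
--     remaining = golden_size
--     picks: list[dict] = []
--     for idx, subset in enumerate(subsets):
--         subsets_left = len(subsets) - idx
--         # Ceil division evenly distributes the remainder across the earliest
--         # subsets while keeping the total exactly `golden_size`.
--         allocation = min(-(-remaining // subsets_left), len(subset_candidates[subset]))
--         candidates = subset_candidates[subset]
--         if allocation > 0:
--             step = len(candidates) / allocation
--             picks.extend(candidates[int(j * step)] for j in range(allocation))
--             remaining -= allocation
--
--     return picks
-- ===== SOURCE B (Python) =====
-- def _stratified_pick(
--     subset_candidates: dict[str, list[dict]], golden_size: int
-- ) -> list[dict]: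
--     """Block closed-form variant: instead of a per-subset ceiling division,
--     distribute the remaining budget with one divmod into q/m shares and walk
--     the sorted groups on those shares, recomputing only when a subset caps
--     below its share; stops as soon as nothing remains."""
--     groups = [subset_candidates[key] for key in sorted(subset_candidates)]
--     picks: list[dict] = []
--     r = golden_size
--     i = 0
--     n = len(groups)
--     while i < n and r > 0:
--         q, m = divmod(r, n - i)
--         while i < n:
--             g = groups[i]
--             share = q + 1 if m > 0 else q
--             if len(g) < share:
--                 # capped: take everything, redistribute over the remainder
--                 if g:
--                     picks += _spread(g, len(g))
--                 r -= len(g)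
--                 i += 1
--                 break
--             if share > 0:
--                 picks += _spread(g, share)
--                 r -= share
--             if m > 0:
--                 m -= 1
--             i += 1
--     return picks
--
--
-- def _spread(cands, take):
--     step = len(cands) / take
--     return [cands[int(j * step)] for j in range(take)]
-- ===== Notes on version B (the rewrite author's own statement) =====
-- stated objective: alternative
-- what changed: A recomputes a ceiling division for every subset while decrementing the budget; B instead computes the share distribution in closed form with one divmod (q full shares plus m incremented ones) and walks the sorted groups on those precomputed shares, redoing the divmod only when a subset caps below its share, and exits immediately once the remaining budget is non-positive.
import Mathlib
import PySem

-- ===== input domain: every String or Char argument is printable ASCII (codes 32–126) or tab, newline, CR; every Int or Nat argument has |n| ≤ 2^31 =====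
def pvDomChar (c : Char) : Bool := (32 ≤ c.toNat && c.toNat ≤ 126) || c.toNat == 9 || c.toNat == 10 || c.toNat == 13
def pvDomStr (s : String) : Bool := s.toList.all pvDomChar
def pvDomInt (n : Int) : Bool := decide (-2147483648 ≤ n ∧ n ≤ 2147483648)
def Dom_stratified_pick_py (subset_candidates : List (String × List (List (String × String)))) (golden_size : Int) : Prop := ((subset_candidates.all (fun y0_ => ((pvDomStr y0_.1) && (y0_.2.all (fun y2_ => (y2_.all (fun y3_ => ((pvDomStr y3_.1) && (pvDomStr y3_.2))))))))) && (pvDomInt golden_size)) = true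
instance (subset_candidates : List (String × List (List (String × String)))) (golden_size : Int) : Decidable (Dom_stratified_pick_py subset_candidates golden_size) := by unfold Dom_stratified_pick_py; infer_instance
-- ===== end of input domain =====

-- B replaces A's per-subset ceiling-division recurrence by a block-wise closed-form
-- distribution: one divmod yields the q/m shares for a whole run of uncapped subsets,
-- recomputed only when a subset caps, with an early exit once nothing remains
-- (objective: alternative; same asymptotic cost).
-- Both Pythons compute the identical expression `int(j * (len(candidates)/alloc))`;
-- it is modelled exactly below (spFloatIdx) by IEEE-754 double rounding (round to
-- nearest, ties to even, 53-bit significand) written out in integer arithmetic.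

-- shared transliteration helpers (the same subexpressions appear verbatim in A and B)

-- dict lookup `subset_candidates[subset]` (key always present: it comes from the key list)
def spGet (d : List (String × List (List (String × String)))) (k : String) :
    List (List (String × String)) :=
  ((d.find? (fun p => p.1 == k)).map Prod.snd).getD []

-- round num/den (num ≥ 0, den ≥ 1) to the nearest IEEE double, ties to even;
-- result (m, e) represents the exact value m * 2^e, 2^52 ≤ m < 2^53 (or m = 0)
def spRnd53 (num den : Nat) : Nat × Int :=
  if num = 0 then (0, 0) else
  let t := Nat.log2 den + 54
  let N := num <<< t
  let q := N / den
  let r := N % den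
  let drop := (Nat.log2 q + 1) - 53
  let half := 1 <<< (drop - 1)
  let low := q % (1 <<< drop)
  let high := q / (1 <<< drop)
  let high' := if low > half ∨ (low = half ∧ (r > 0 ∨ high % 2 = 1)) then high + 1 else high
  if high' = 1 <<< 53 then (high' / 2, ((drop : Int) + 1) - t) else (high', (drop : Int) - t)

-- int(x) for a nonnegative double m * 2^e (truncation toward zero)
def spTrunc (m : Nat) (e : Int) : Nat :=
  if 0 ≤ e then m <<< e.toNat else m >>> (-e).toNat

-- `int(j * step)` with `step = n / a` under Python float (IEEE double) semantics:
-- step = fl(n/a); j (exact as a double) times step rounds j*m to 53 bits; truncate.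
def spFloatIdx (j n a : Nat) : Nat :=
  let s := spRnd53 n a
  let p := spRnd53 (j * s.1) 1
  spTrunc p.1 (p.2 + s.2)

-- ===== PORT A =====
-- the for-loop of A: state (remaining, picks), one fused allocate-and-pick step
def spALoop (d : List (String × List (List (String × String)))) (total : Nat) :
    List (Int × String) → Int → List (List (String × String)) → List (List (String × String))
  | [], _, picks => picks
  | (idx, subset) :: rest, remaining, picks =>
    let subsets_left : Int := (total : Int) - idx
    let allocation :=
      min (-(PySem.Int.floordiv (-remaining) subsets_left)) ((spGet d subset).length : Int)
    let candidates := spGet d subset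
    if allocation > 0 then
      spALoop d total rest (remaining - allocation)
        (picks ++ (PySem.List.pyRange 0 allocation 1).map
          (fun j => candidates.getD (spFloatIdx j.toNat candidates.length allocation.toNat) []))
    else
      spALoop d total rest remaining picks

def stratified_pick_py (subset_candidates : List (String × List (List (String × String)))) (golden_size : Int) : List (List (String × String)) :=
  let subsets := PySem.List.sorted (subset_candidates.map Prod.fst) (fun x => x) false
  if subsets = [] then []
  else spALoop subset_candidates subsets.length (PySem.List.enumerate subsets 0) golden_size []

-- ===== PORT B =====
-- helper `_spread(cands, take)` of Source B
def spSpread (g : List (List (String × String))) (take : Int) : List (List (String × String)) :=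
  (PySem.List.pyRange 0 take 1).map (fun j => g.getD (spFloatIdx j.toNat g.length take.toNat) [])

-- `_outer` / `_inner` of Source B: closed-form q/m shares per uncapped block
mutual
def spBOuter (groups : List (List (List (String × String)))) (r : Int) :
    List (List (String × String)) :=
  if groups = [] ∨ r ≤ 0 then []
  else spBInner groups (PySem.Int.floordiv r groups.length) (PySem.Int.mod r groups.length) r
termination_by 2 * groups.length + 1
decreasing_by all_goals simp

def spBInner (groups : List (List (List (String × String)))) (q m r : Int) :
    List (List (String × String)) :=
  match groups with
  | [] => []
  | g :: rest =>
    let share := if 0 < m then q + 1 else q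
    if (g.length : Int) < share then
      (if g ≠ [] then spSpread g (g.length : Int) else []) ++ spBOuter rest (r - g.length)
    else
      (if 0 < share then spSpread g share else []) ++
        spBInner rest q (if 0 < m then m - 1 else m) (r - share)
termination_by 2 * groups.length
decreasing_by all_goals simp <;> omega
end


def stratified_pick_py_alt (subset_candidates : List (String × List (List (String × String)))) (golden_size : Int) : List (List (String × String)) :=
  let groups := (PySem.List.sorted (subset_candidates.map Prod.fst) (fun x => x) false).map
    (spGet subset_candidates)
  spBOuter groups golden_size

-- ===== PRECONDITION & SPEC =====
def Spec_stratified_pick_py (subset_candidates : List (String × List (List (String × String)))) (golden_size : Int) (out : List (List (String × String))) : Prop := out = stratified_pick_py_alt subset_candidates golden_size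
instance (subset_candidates : List (String × List (List (String × String)))) (golden_size : Int) (out : List (List (String × String))) : Decidable (Spec_stratified_pick_py subset_candidates golden_size out) := by unfold Spec_stratified_pick_py; infer_instance

-- ===== CLAIM (what is proved, stated in full; the proofs are below) =====
def Claim_equal_stratified_pick_py : Prop := ∀ (subset_candidates : List (String × List (List (String × String)))) (golden_size : Int), Dom_stratified_pick_py subset_candidates golden_size → Spec_stratified_pick_py subset_candidates golden_size (stratified_pick_py subset_candidates golden_size)

-- ===== LEMMAS AND PROOFS =====

-- proof-side restatement of A's loop over the list of candidate groups
-- (subsets_left becomes the length of the remaining suffix)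
def spAL (r : Int) : List (List (List (String × String))) → List (List (String × String))
  | [] => []
  | g :: rest =>
    let k : Int := ((g :: rest).length : Int)
    let a := min (-(PySem.Int.floordiv (-r) k)) ((g.length : Int))
    if a > 0 then
      (PySem.List.pyRange 0 a 1).map
        (fun j => g.getD (spFloatIdx j.toNat g.length a.toNat) []) ++ spAL (r - a) rest
    else spAL r rest

-- A's loop with enumerate indices equals spAL over the mapped groups
theorem spALoop_bridge (d : List (String × List (List (String × String)))) (total : Nat) :
    ∀ (l : List String) (s : Int), (total : Int) = s + l.length →
    ∀ (r : Int) (picks : List (List (String × String))),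
    spALoop d total (PySem.List.enumerate l s) r picks = picks ++ spAL r (l.map (spGet d)) := by
  intro l
  induction l with
  | nil => intro s _ r picks; simp [PySem.List.enumerate_nil, spALoop, spAL]
  | cons a l ih =>
    intro s hs r picks
    rw [PySem.List.enumerate_cons]
    simp only [spALoop, List.map_cons, spAL, List.length_cons, List.length_map]
    have hk : (total : Int) - s = ((l.length : Int) + 1 : Int) := by
      simp [List.length_cons] at hs; omega
    rw [show ((l.length + 1 : Nat) : Int) = ((l.length : Int) + 1 : Int) by push_cast; ring, hk]
    have hs' : (total : Int) = (s + 1) + l.length := by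
      simp [List.length_cons] at hs; omega
    by_cases h : min (-(PySem.Int.floordiv (-r) ((l.length : Int) + 1)))
        ((spGet d a).length : Int) > 0
    · simp only [if_pos h, ih (s + 1) hs', List.append_assoc]
    · simp only [if_neg h, ih (s + 1) hs']

-- when nothing remains, A's loop picks nothing
theorem spAL_nonpos (r : Int) (hr : r ≤ 0) :
    ∀ groups, spAL r groups = [] := by
  intro groups
  induction groups with
  | nil => simp [spAL]
  | cons g rest ih =>
    simp only [spAL]
    have hk : (0 : Int) < ((g :: rest).length : Int) := by
      exact_mod_cast Nat.succ_pos rest.length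
    have h1 : 0 ≤ PySem.Int.floordiv (-r) ((g :: rest).length : Int) := by
      rw [PySem.Int.floordiv_eq_ediv_of_pos hk]
      exact Int.ediv_nonneg (by omega) (le_of_lt hk)
    have h2 : ¬ (min (-(PySem.Int.floordiv (-r) ((g :: rest).length : Int)))
        ((g.length : Int)) > 0) := by
      have := min_le_left (-(PySem.Int.floordiv (-r) ((g :: rest).length : Int)))
        ((g.length : Int))
      omega
    rw [if_neg h2]; exact ih

-- the value of A's ceiling division on a decomposed remaining budget
theorem spCeil (q m k : Int) (hk : 0 < k) (hm0 : 0 ≤ m) (hmk : m ≤ k) :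
    -(PySem.Int.floordiv (-(q * k + m)) k) = q + (if 0 < m then 1 else 0) := by
  rw [PySem.Int.floordiv_eq_ediv_of_pos hk]
  split_ifs with hm
  · have h : -(q * k + m) = (k - m) + (-q - 1) * k := by ring
    rw [h, Int.add_mul_ediv_right _ _ (ne_of_gt hk),
        Int.ediv_eq_zero_of_lt (by omega) (by omega)]
    omega
  · have hm' : m = 0 := by omega
    have h : -(q * k + m) = 0 + (-q) * k := by rw [hm']; ring
    rw [h, Int.add_mul_ediv_right _ _ (ne_of_gt hk), Int.zero_ediv]
    omega

-- core: B's inner share-walk reproduces A's ceiling-division recurrence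
theorem spInner_eq :
    ∀ (groups : List (List (List (String × String)))) (q m r : Int),
    (∀ rest : List (List (List (String × String))), rest.length < groups.length →
      ∀ r', spAL r' rest = spBOuter rest r') →
    0 ≤ q → 0 ≤ m → m ≤ (groups.length : Int) → r = q * groups.length + m →
    spBInner groups q m r = spAL r groups := by
  intro groups
  induction groups with
  | nil => intro q m r _ _ _ _ _; simp [spBInner, spAL]
  | cons g rest ih =>
    intro q m r houter hq hm0 hmk hr
    have hk : (0 : Int) < ((g :: rest).length : Int) := by
      exact_mod_cast Nat.succ_pos rest.length
    have hceil : -(PySem.Int.floordiv (-r) ((g :: rest).length : Int))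
        = q + (if 0 < m then 1 else 0) := by
      rw [hr]; exact spCeil q m _ hk hm0 hmk
    simp only [spBInner, spAL]
    rw [hceil]
    set share : Int := if 0 < m then q + 1 else q with hshare
    have hsh : q + (if 0 < m then (1:Int) else 0) = share := by
      rw [hshare]; split_ifs <;> omega
    rw [hsh]
    have hlen : ((g :: rest).length : Int) = (rest.length : Int) + 1 := by
      simp [List.length_cons]
    by_cases hcap : (g.length : Int) < share
    · -- capped subset: take everything, redistribute via spBOuter on the rest
      rw [if_pos hcap]
      have hmin : min share ((g.length : Int)) = (g.length : Int) := by omega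
      rw [hmin]
      by_cases hg : g = []
      · have hg0 : (g.length : Int) = 0 := by simp [hg]
        rw [if_neg (by omega : ¬ ((g.length : Int) > 0)), if_neg (by simp [hg])]
        rw [hg0, sub_zero, List.nil_append]
        exact (houter rest (by simp [List.length_cons]) r).symm
      · have hg0 : (g.length : Int) > 0 := by
          have : g.length ≠ 0 := by simpa using hg
          omega
        rw [if_pos hg0, if_pos hg]
        rw [← houter rest (by simp [List.length_cons]) (r - g.length)]
        simp [spSpread]
    · -- uncapped: allocate the closed-form share and continue the walk
      rw [if_neg hcap]
      have hmin : min share ((g.length : Int)) = share := by omega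
      rw [hmin]
      have houter' : ∀ rest' : List (List (List (String × String))),
          rest'.length < rest.length → ∀ r', spAL r' rest' = spBOuter rest' r' := by
        intro rest' h r'
        exact houter rest' (by simp [List.length_cons]; omega) r'
      have hrec : spBInner rest q (if 0 < m then m - 1 else m) (r - share) = spAL (r - share) rest := by
        apply ih q (if 0 < m then m - 1 else m) (r - share) houter' hq
        · split_ifs <;> omega
        · split_ifs with h
          · omega
          · have : m = 0 := by omega
            simp [this]
        · rw [hr, hshare]
          split_ifs with h
          · rw [hlen]; ring
          · have hm' : m = 0 := by omega
            rw [hm', hlen]; ring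
      rw [hrec]
      by_cases hpos : 0 < share
      · rw [if_pos hpos, if_pos (by omega : share > 0)]
        simp [spSpread]
      · have hsh0 : share = 0 := by
          rw [hshare] at hpos ⊢; split_ifs at hpos ⊢ <;> omega
        rw [if_neg hpos, if_neg (by omega : ¬ (share > 0)), hsh0, sub_zero, List.nil_append]

-- A's recurrence equals B's outer driver on every group list and budget
theorem spAL_eq_spBOuter :
    ∀ (n : Nat) (groups : List (List (List (String × String)))), groups.length ≤ n →
    ∀ r, spAL r groups = spBOuter groups r := by
  intro n
  induction n with
  | zero =>
    intro groups hg r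
    have : groups = [] := by
      cases groups with
      | nil => rfl
      | cons a l => simp at hg
    subst this
    simp [spAL, spBOuter]
  | succ n ih =>
    intro groups hg r
    by_cases hr : r ≤ 0
    · rw [spAL_nonpos r hr groups, spBOuter, if_pos (Or.inr hr)]
    · by_cases hgnil : groups = []
      · subst hgnil; simp [spAL, spBOuter]
      · rw [spBOuter, if_neg (by push Not; exact ⟨hgnil, by omega⟩)]
        have hk : (0 : Int) < (groups.length : Int) := by
          have : groups.length ≠ 0 := by simpa using hgnil
          omega
        set q := PySem.Int.floordiv r (groups.length : Int) with hqdef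
        set m := PySem.Int.mod r (groups.length : Int) with hmdef
        have hq : 0 ≤ q := by
          rw [hqdef, PySem.Int.floordiv_eq_ediv_of_pos hk]
          exact Int.ediv_nonneg (by omega) (le_of_lt hk)
        have hm0 : 0 ≤ m := PySem.Int.mod_nonneg r hk
        have hmlt : m < (groups.length : Int) := PySem.Int.mod_lt r hk
        have hrdec : r = q * (groups.length : Int) + m := by
          have := PySem.Int.floordiv_mul_add_mod r ((groups.length : Int))
          rw [← hqdef, ← hmdef] at this
          omega
        have houter : ∀ rest : List (List (List (String × String))),
            rest.length < groups.length → ∀ r', spAL r' rest = spBOuter rest r' := by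
          intro rest hlt r'
          exact ih rest (by omega) r'
        exact (spInner_eq groups q m r houter hq hm0 (le_of_lt hmlt) hrdec).symm

-- ===== VERDICT (by name: the statement is the Claim_ definition above) =====
theorem stratified_pick_py_spec : Claim_equal_stratified_pick_py := by
  intro subset_candidates golden_size _
  unfold Spec_stratified_pick_py stratified_pick_py stratified_pick_py_alt
  simp only []
  by_cases h : PySem.List.sorted (subset_candidates.map Prod.fst) (fun x => x) false = []
  · simp [h, spBOuter]
  · rw [if_neg h]
    rw [spALoop_bridge subset_candidates _ _ 0 (by simp) golden_size []]
    rw [List.nil_append]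
    exact spAL_eq_spBOuter _ _ (le_refl _) golden_size
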